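-- pv_equiv track=rewrite | github.com/hermansaksono/basics | algorithms/quick_sort.py | get_smallers
-- ===== SOURCE A (Python) =====
-- def get_smallers(list_of_numbers, pivot):
--     """Return list of numbers smaller than pivot"""
--     # type: (list[int], int) -> list[int]
--     if len(list_of_numbers) == 0:
--         return []
--     else:
--         if list_of_numbers[0] < pivot:
--             return [list_of_numbers[0]] + get_smallers(list_of_numbers[1:], pivot)
--         else:
--             return get_smallers(list_of_numbers[1:], pivot)
-- ===== SOURCE B (Python) =====
-- def get_smallers(list_of_numbers, pivot):
--     """Return list of numbers smaller than pivot"""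
--     # type: (list[int], int) -> list[int]
--     result = []
--     for n in list_of_numbers:
--         if n < pivot:
--             result.append(n)
--     return result
-- ===== Notes on version B (the rewrite author's own statement) =====
-- stated objective: faster
-- what changed: Replaced head/tail recursion (which copies the tail with list_of_numbers[1:] and builds [head] + rec at each level) with a single iterative for-loop appending to an accumulator.
import Mathlib
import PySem

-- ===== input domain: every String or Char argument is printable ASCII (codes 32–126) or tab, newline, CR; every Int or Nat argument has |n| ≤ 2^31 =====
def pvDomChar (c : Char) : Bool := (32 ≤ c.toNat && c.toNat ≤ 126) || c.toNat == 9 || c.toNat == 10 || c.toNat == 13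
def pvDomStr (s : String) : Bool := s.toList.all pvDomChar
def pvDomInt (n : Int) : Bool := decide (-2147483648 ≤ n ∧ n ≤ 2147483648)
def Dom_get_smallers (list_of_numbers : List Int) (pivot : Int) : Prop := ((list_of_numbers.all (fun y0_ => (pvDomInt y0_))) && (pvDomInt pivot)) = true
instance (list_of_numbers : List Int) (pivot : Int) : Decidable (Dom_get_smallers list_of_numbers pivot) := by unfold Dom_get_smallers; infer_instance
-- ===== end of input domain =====

-- B replaces the head/tail recursion with a single iterative loop over the list appending to an accumulator (simpler, no slice copies).

-- ===== PORT A =====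
-- A: if the list is empty return []; otherwise cons-case: prepend the head when it is < pivot, recurse on the tail (list_of_numbers[1:]).
def get_smallers (list_of_numbers : List Int) (pivot : Int) : List Int :=
  match list_of_numbers with
  | [] => []
  | x :: rest =>
      if x < pivot then [x] ++ get_smallers rest pivot
      else get_smallers rest pivot

-- ===== PORT B =====
-- B: for-loop with accumulator `result`, appending n when n < pivot.
def get_smallers_alt (list_of_numbers : List Int) (pivot : Int) : List Int :=
  list_of_numbers.foldl (fun result n => if n < pivot then result ++ [n] else result) []

-- ===== PRECONDITION & SPEC =====
def Spec_get_smallers (list_of_numbers : List Int) (pivot : Int) (out : List Int) : Prop := out = get_smallers_alt list_of_numbers pivot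
instance (list_of_numbers : List Int) (pivot : Int) (out : List Int) : Decidable (Spec_get_smallers list_of_numbers pivot out) := by unfold Spec_get_smallers; infer_instance

-- ===== CLAIM (what is proved, stated in full; the proofs are below) =====
def Claim_equal_get_smallers : Prop := ∀ (list_of_numbers : List Int) (pivot : Int), Dom_get_smallers list_of_numbers pivot → Spec_get_smallers list_of_numbers pivot (get_smallers list_of_numbers pivot)

-- ===== LEMMAS AND PROOFS =====

-- Loop invariant: folding B's loop body from accumulator `acc` yields `acc ++` A's recursive result.
theorem get_smallers_foldl_inv (l : List Int) (p : Int) (acc : List Int) :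
    l.foldl (fun result n => if n < p then result ++ [n] else result) acc
      = acc ++ get_smallers l p := by
  induction l generalizing acc with
  | nil => simp [get_smallers]
  | cons x rest ih =>
      simp only [List.foldl, get_smallers]
      by_cases h : x < p <;> simp [h, ih]

-- ===== VERDICT (by name: the statement is the Claim_ definition above) =====
theorem get_smallers_spec : Claim_equal_get_smallers := by
  intro l p _
  unfold Spec_get_smallers get_smallers_alt
  simp [get_smallers_foldl_inv]
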